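-- pv_equiv track=rewrite | github.com/Sandy4321/playoffsPredictionNBA | code/dataMerger/mergeDownloadedFiles.py | groupFilePathsByTeamID
-- ===== SOURCE A (Python) =====
-- def groupFilePathsByTeamID(rawDataFilePaths, teamIDs):
--     # dictionary of lists (each comprised of file paths for a single team), with teamIDs used as keys
--     groupedFilePaths = {}
--     for teamID in teamIDs:
--         for rawDataFilePath in list(rawDataFilePaths):  # iterate over a copy of rawDataFilePaths list (because we will be removing elements from the original rawDataFilePaths list)
--             if teamID in rawDataFilePath:
--                 if teamID in groupedFilePaths:  # if groupedFilePaths dictionary has an existing key and a list, append to the list; then remove the file path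
--                     groupedFilePaths[teamID].append(rawDataFilePath)
--                     rawDataFilePaths.remove(rawDataFilePath)
--                 else:  # if groupedFilePaths diction does not have an existing key and a list, create a new key and a list with the team ID
--                     groupedFilePaths[teamID] = [rawDataFilePath]
--                     rawDataFilePaths.remove(rawDataFilePath)
--     return(groupedFilePaths)
-- ===== SOURCE B (Python) =====
-- def groupFilePathsByTeamID(rawDataFilePaths, teamIDs):
--     # One pass over the paths: each path is assigned to the first teamID contained
--     # in it (or left alone); groups are emitted in teamIDs order afterwards.
--     # Mutates rawDataFilePaths exactly as A does: all matched paths are removed.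
--     groups = {}
--     leftovers = []
--     for path in rawDataFilePaths:
--         key = next((t for t in teamIDs if t in path), None)
--         if key is None:
--             leftovers.append(path)
--         else:
--             groups.setdefault(key, []).append(path)
--     rawDataFilePaths[:] = leftovers
--     return {t: groups[t] for t in teamIDs if t in groups}
-- ===== Notes on version B (the rewrite author's own statement) =====
-- stated objective: simpler
-- what changed: A repeatedly rescans the shrinking path list once per team (team-outer, path-inner, with dict-membership branching and list.remove); B makes one group-by pass over the paths, deriving each path's key as the first containing teamID, then emits the groups in teamIDs order.
import Mathlib
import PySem

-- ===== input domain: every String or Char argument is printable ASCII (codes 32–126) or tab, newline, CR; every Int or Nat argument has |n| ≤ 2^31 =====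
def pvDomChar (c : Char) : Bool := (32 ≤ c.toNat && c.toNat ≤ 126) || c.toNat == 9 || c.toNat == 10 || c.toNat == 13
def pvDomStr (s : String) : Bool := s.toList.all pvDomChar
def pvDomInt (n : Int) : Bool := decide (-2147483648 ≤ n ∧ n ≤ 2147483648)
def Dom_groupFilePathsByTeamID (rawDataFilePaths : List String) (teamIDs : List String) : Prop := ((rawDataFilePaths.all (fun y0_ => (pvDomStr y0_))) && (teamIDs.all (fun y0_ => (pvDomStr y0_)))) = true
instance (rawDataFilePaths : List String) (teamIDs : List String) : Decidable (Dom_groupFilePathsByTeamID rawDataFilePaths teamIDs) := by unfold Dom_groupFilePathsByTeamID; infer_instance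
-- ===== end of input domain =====

-- B replaces A's team-outer/path-inner repeated rescan by a single group-by pass over the
-- paths (key = first containing teamID) followed by emission in teamIDs order: simpler.
-- A mutates rawDataFilePaths in place (removes matched paths); B performs the same mutation
-- in Python; the equivalence proved here is about the RETURN value only.


-- ===== PORT A =====
-- inner 'for rawDataFilePath in list(rawDataFilePaths)' loop: iterates the copy, state =
-- (groupedFilePaths, live rawDataFilePaths).  'groupedFilePaths[teamID].append(x)' is
-- ported as insert of (old value ++ [x]) (overwrite keeps position = in-place append);
-- 'rawDataFilePaths.remove(p)' via PySem.List.remove? (it always succeeds here: p is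
-- still in the live list, so the .getD fallback is never taken).
def pvAInner (teamID : String) : List String → PySem.Dict String (List String) × List String → PySem.Dict String (List String) × List String
  | [], st => st
  | p :: rest, st =>
      pvAInner teamID rest
        (if PySem.Str.isIn teamID p then
           (if st.1.contains teamID then st.1.insert teamID (st.1.getD teamID [] ++ [p])
            else st.1.insert teamID [p],
            (PySem.List.remove? st.2 p).getD st.2)
         else st)

def groupFilePathsByTeamID (rawDataFilePaths : List String) (teamIDs : List String) : List (String × List String) :=
  (teamIDs.foldl (fun st teamID => pvAInner teamID st.2 st) (PySem.Dict.empty, rawDataFilePaths)).1.items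

-- ===== PORT B =====
-- one pass over the paths: groups.setdefault(key, []).append(path) = Dict.modify key [] (· ++ [path])
def pvBStep (teamIDs : List String) (st : PySem.Dict String (List String) × List String) (path : String) : PySem.Dict String (List String) × List String :=
  match teamIDs.find? (fun t => PySem.Str.isIn t path) with
  | none => (st.1, st.2 ++ [path])
  | some key => (st.1.modify key [] (· ++ [path]), st.2)

-- the final dict comprehension '{t: groups[t] for t in teamIDs if t in groups}'
def pvEmitStep (groups : PySem.Dict String (List String)) (d : PySem.Dict String (List String)) (t : String) : PySem.Dict String (List String) :=
  if groups.contains t then d.insert t (groups.getD t []) else d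

def groupFilePathsByTeamID_alt (rawDataFilePaths : List String) (teamIDs : List String) : List (String × List String) :=
  let st := rawDataFilePaths.foldl (pvBStep teamIDs) (PySem.Dict.empty, [])
  (teamIDs.foldl (pvEmitStep st.1) PySem.Dict.empty).items

-- ===== PRECONDITION & SPEC =====
def Spec_groupFilePathsByTeamID (rawDataFilePaths : List String) (teamIDs : List String) (out : List (String × List String)) : Prop := out = groupFilePathsByTeamID_alt rawDataFilePaths teamIDs
instance (rawDataFilePaths : List String) (teamIDs : List String) (out : List (String × List String)) : Decidable (Spec_groupFilePathsByTeamID rawDataFilePaths teamIDs out) := by unfold Spec_groupFilePathsByTeamID; infer_instance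

-- ===== CLAIM (what is proved, stated in full; the proofs are below) =====
def Claim_equal_groupFilePathsByTeamID : Prop := ∀ (rawDataFilePaths : List String) (teamIDs : List String), Dom_groupFilePathsByTeamID rawDataFilePaths teamIDs → Spec_groupFilePathsByTeamID rawDataFilePaths teamIDs (groupFilePathsByTeamID rawDataFilePaths teamIDs)

-- ===== LEMMAS AND PROOFS =====

-- canonical grouping both sides are reduced to: walk the teams in order, pairing each
-- team with the still-unclaimed paths containing it
def pvCanon : List String → List String → List (String × List String)
  | [], _ => []
  | t :: ts, live =>
      let M := live.filter (fun p => PySem.Str.isIn t p)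
      if M.isEmpty then pvCanon ts live
      else (t, M) :: pvCanon ts (live.filter (fun p => !PySem.Str.isIn t p))

lemma pv_filter_not (live : List String) (q : String → Bool) (h : live.filter q = []) :
    live.filter (fun p => !q p) = live := by
  apply List.filter_eq_self.mpr
  intro a ha
  have := List.filter_eq_nil_iff.mp h a ha
  simp at this ⊢
  exact this

lemma pv_remove_keep (t : String) (p : String) (hp : PySem.Str.isIn t p = true) :
    ∀ (keep : List String) (rest : List String), (∀ k ∈ keep, PySem.Str.isIn t k = false) →
    PySem.List.remove? (keep ++ p :: rest) p = some (keep ++ rest) := by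
  intro keep
  induction keep with
  | nil => intro rest h; simp
  | cons k ks ih =>
      intro rest h
      have hk : k ≠ p := by
        intro e
        have hkf := h k (by simp)
        rw [e, hp] at hkf
        exact Bool.true_eq_false.mp hkf
      rw [List.cons_append, PySem.List.remove?_cons_of_ne _ hk,
        ih rest (fun x hx => h x (List.mem_cons_of_mem _ hx))]
      rfl

lemma pv_inner (t : String) : ∀ (copy keep : List String) (d : PySem.Dict String (List String)),
    (∀ k ∈ keep, PySem.Str.isIn t k = false) →
    pvAInner t copy (d, keep ++ copy) =
      ((copy.filter (fun p => PySem.Str.isIn t p)).foldl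
          (fun d p => if d.contains t then d.insert t (d.getD t [] ++ [p]) else d.insert t [p]) d,
       keep ++ copy.filter (fun p => !PySem.Str.isIn t p)) := by
  intro copy
  induction copy with
  | nil => intro keep d h; simp [pvAInner]
  | cons p rest ih =>
      intro keep d h
      unfold pvAInner
      by_cases hp : PySem.Str.isIn t p = true
      · have hrem : PySem.List.remove? (keep ++ p :: rest) p = some (keep ++ rest) :=
          pv_remove_keep t p hp keep rest h
        rw [if_pos hp]
        simp only [hrem, Option.getD_some]
        rw [ih keep _ h, List.filter_cons_of_pos hp, List.foldl_cons,
          List.filter_cons_of_neg (by rw [hp]; simp)]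
      · have hpf : PySem.Str.isIn t p = false := eq_false_of_ne_true hp
        rw [if_neg hp]
        have hkeep : ∀ k ∈ keep ++ [p], PySem.Str.isIn t k = false := by
          intro k hk
          rcases List.mem_append.mp hk with hk | hk
          · exact h k hk
          · rw [List.mem_singleton.mp hk]; exact hpf
        have hre : keep ++ p :: rest = (keep ++ [p]) ++ rest := by simp
        rw [hre, ih (keep ++ [p]) d hkeep, List.filter_cons_of_neg (by rw [hpf]; simp),
          List.filter_cons_of_pos (by rw [hpf]; simp)]
        simp

lemma pv_fold_app (t : String) (d : PySem.Dict String (List String)) :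
    ∀ (M v : List String),
    M.foldl (fun d p => if d.contains t then d.insert t (d.getD t [] ++ [p]) else d.insert t [p]) (d.insert t v)
      = d.insert t (v ++ M) := by
  intro M
  induction M with
  | nil => intro v; simp
  | cons p M ih =>
      intro v
      rw [List.foldl_cons]
      have hstep : (if (d.insert t v).contains t then (d.insert t v).insert t ((d.insert t v).getD t [] ++ [p])
          else (d.insert t v).insert t [p]) = d.insert t (v ++ [p]) := by
        rw [if_pos (PySem.Dict.contains_insert_self d t v), PySem.Dict.getD_insert_self,
          PySem.Dict.insert_insert_self]
      rw [hstep, ih (v ++ [p]), List.append_assoc]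
      rfl

lemma pv_fold_insert (t : String) (d : PySem.Dict String (List String)) (M : List String)
    (hc : d.contains t = false) (hM : M ≠ []) :
    M.foldl (fun d p => if d.contains t then d.insert t (d.getD t [] ++ [p]) else d.insert t [p]) d
      = d.insert t M := by
  cases M with
  | nil => exact absurd rfl hM
  | cons p M =>
      rw [List.foldl_cons, if_neg (by rw [hc]; exact Bool.false_ne_true)]
      exact pv_fold_app t d M [p]

lemma pv_A_char : ∀ (ts : List String) (d : PySem.Dict String (List String)) (live : List String),
    d.keys.Nodup →
    (∀ u, d.contains u = true → live.filter (fun p => PySem.Str.isIn u p) = []) →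
    (ts.foldl (fun st teamID => pvAInner teamID st.2 st) (d, live)).1.items = d.items ++ pvCanon ts live := by
  intro ts
  induction ts with
  | nil => intro d live hn h; simp [pvCanon]
  | cons t ts ih =>
      intro d live hn h
      rw [List.foldl_cons]
      have hin := pv_inner t live [] d (by intro k hk; cases hk)
      simp only [List.nil_append] at hin
      have hin2 : pvAInner t ((d, live) :
          PySem.Dict String (List String) × List String).2 (d, live)
          = (((live.filter (fun p => PySem.Str.isIn t p)).foldl
              (fun d p => if d.contains t then d.insert t (d.getD t [] ++ [p]) else d.insert t [p]) d),
             live.filter (fun p => !PySem.Str.isIn t p)) := hin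
      rw [hin2]
      by_cases hM : live.filter (fun p => PySem.Str.isIn t p) = []
      · have hlive : live.filter (fun p => !PySem.Str.isIn t p) = live := pv_filter_not live _ hM
        have hcanon : pvCanon (t :: ts) live = pvCanon ts live := by
          simp only [pvCanon, hM]
          rfl
        rw [hM, hlive, List.foldl_nil, hcanon]
        exact ih d live hn h
      · have hc : d.contains t = false := by
          cases hcc : d.contains t
          · rfl
          · exact absurd (h t hcc) hM
        rw [pv_fold_insert t d _ hc hM]
        have hnew : ∀ u, (d.insert t (live.filter (fun p => PySem.Str.isIn t p))).contains u = true →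
            (live.filter (fun p => !PySem.Str.isIn t p)).filter (fun p => PySem.Str.isIn u p) = [] := by
          intro u hu
          rw [PySem.Dict.contains_insert] at hu
          rw [List.filter_filter]
          by_cases hut : u = t
          · subst hut
            apply List.filter_eq_nil_iff.mpr
            intro a ha
            simp
          · have hdu : d.contains u = true := by
              rcases Bool.or_eq_true_iff.mp hu with h1 | h1
              · exact absurd (by simpa using h1) hut
              · exact h1
            apply List.filter_eq_nil_iff.mpr
            intro a ha hpred
            have hpred' : (PySem.Str.isIn u a && !PySem.Str.isIn t a) = true := hpred
            have hua : PySem.Str.isIn u a = true := (Bool.and_eq_true_iff.mp hpred').1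
            have hthis : ¬ PySem.Str.isIn u a = true := List.filter_eq_nil_iff.mp (h u hdu) a ha
            exact hthis hua
        have hMne : (live.filter (fun p => PySem.Str.isIn t p)).isEmpty = false := by
          cases hh : (live.filter (fun p => PySem.Str.isIn t p)).isEmpty
          · rfl
          · exact absurd (List.isEmpty_iff.mp hh) hM
        have hcanon : pvCanon (t :: ts) live
            = (t, live.filter (fun p => PySem.Str.isIn t p)) ::
              pvCanon ts (live.filter (fun p => !PySem.Str.isIn t p)) := by
          simp only [pvCanon, hMne]
          rfl
        rw [ih _ _ (PySem.Dict.nodup_keys_insert d t _ hn) hnew,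
          PySem.Dict.items_insert_of_not_contains d _ hc, hcanon]
        simp

lemma pv_emit_get? (groups : PySem.Dict String (List String)) :
    ∀ (pre : List String) (d : PySem.Dict String (List String)) (u : String),
    (pre.foldl (pvEmitStep groups) d).get? u
      = if u ∈ pre ∧ groups.contains u = true then some (groups.getD u []) else d.get? u := by
  intro pre
  induction pre with
  | nil => intro d u; simp
  | cons t pre ih =>
      intro d u
      rw [List.foldl_cons, ih]
      by_cases hp : u ∈ pre ∧ groups.contains u = true
      · rw [if_pos hp, if_pos ⟨List.mem_cons_of_mem _ hp.1, hp.2⟩]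
      · rw [if_neg hp]
        unfold pvEmitStep
        by_cases hut : u = t
        · subst hut
          by_cases hg : groups.contains u = true
          · rw [if_pos hg, PySem.Dict.get?_insert_self, if_pos ⟨List.mem_cons_self, hg⟩]
          · rw [if_neg hg, if_neg (fun h => hg h.2)]
        · have hmem : (u ∈ t :: pre ∧ groups.contains u = true) ↔ (u ∈ pre ∧ groups.contains u = true) := by
            constructor
            · rintro ⟨hm, hg⟩; rcases List.mem_cons.mp hm with h | h
              · exact absurd h hut
              · exact ⟨h, hg⟩
            · rintro ⟨hm, hg⟩; exact ⟨List.mem_cons_of_mem _ hm, hg⟩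
          rw [if_neg (fun h => hp (hmem.mp h))]
          by_cases hg : groups.contains t = true
          · rw [if_pos hg, PySem.Dict.get?_insert_of_ne _ _ hut]
          · rw [if_neg hg]

lemma pv_emit_nodup (groups : PySem.Dict String (List String)) :
    ∀ (pre : List String) (d : PySem.Dict String (List String)), d.keys.Nodup →
    (pre.foldl (pvEmitStep groups) d).keys.Nodup := by
  intro pre
  induction pre with
  | nil => intro d h; exact h
  | cons t pre ih =>
      intro d h
      rw [List.foldl_cons]
      apply ih
      unfold pvEmitStep
      by_cases hg : groups.contains t = true
      · rw [if_pos hg]; exact PySem.Dict.nodup_keys_insert d t _ h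
      · rw [if_neg hg]; exact h

lemma pv_insert_self (d : PySem.Dict String (List String)) (t : String) (v : List String)
    (hn : d.keys.Nodup) (h : d.get? t = some v) : d.insert t v = d := by
  have hc : d.contains t = true := by
    cases hcc : d.contains t
    · rw [(PySem.Dict.get?_eq_none_iff_contains d t).mpr hcc] at h; exact absurd h (by simp)
    · rfl
  apply PySem.Dict.ext
  rw [PySem.Dict.items_insert_of_contains d v hc]
  calc d.items.map (fun p => if p.1 == t then (t, v) else p)
      = d.items.map id := by
        apply List.map_congr_left
        intro p hpm
        by_cases hpt : p.1 = t
        · have hg : d.get? p.1 = some p.2 := PySem.Dict.get?_of_mem_items d (by simpa using hpm) hn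
          rw [hpt, h] at hg
          have hv : v = p.2 := by injection hg
          simp only [hpt, beq_self_eq_true, if_pos, id]
          rw [← hpt, hv]
        · simp [hpt]
    _ = d.items := List.map_id d.items

lemma pv_groups_getD (teams : List String) :
    ∀ (raw : List String) (d : PySem.Dict String (List String)) (lo : List String) (u : String),
    ((raw.foldl (pvBStep teams) (d, lo)).1).getD u []
      = d.getD u [] ++ raw.filter (fun p => teams.find? (fun t => PySem.Str.isIn t p) == some u) := by
  intro raw
  induction raw with
  | nil => intro d lo u; simp
  | cons p raw ih =>
      intro d lo u
      rw [List.foldl_cons]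
      cases hf : teams.find? (fun t => PySem.Str.isIn t p) with
      | none =>
          have hstep : pvBStep teams (d, lo) p = (d, lo ++ [p]) := by unfold pvBStep; rw [hf]
          rw [hstep, ih, List.filter_cons_of_neg (by rw [hf]; simp)]
      | some key =>
          have hstep : pvBStep teams (d, lo) p = (d.modify key [] (fun x => x ++ [p]), lo) := by
            unfold pvBStep; rw [hf]
          rw [hstep, ih, PySem.Dict.getD_modify]
          by_cases hu : u = key
          · subst hu
            rw [if_pos rfl, List.filter_cons_of_pos (by rw [hf]; simp), List.append_assoc]
            rfl
          · rw [if_neg hu, List.filter_cons_of_neg (by rw [hf]; simp; exact fun e => hu e.symm)]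
  

lemma pv_groups_contains (teams : List String) :
    ∀ (raw : List String) (d : PySem.Dict String (List String)) (lo : List String) (u : String),
    ((raw.foldl (pvBStep teams) (d, lo)).1).contains u
      = (d.contains u || !(raw.filter (fun p => teams.find? (fun t => PySem.Str.isIn t p) == some u)).isEmpty) := by
  intro raw
  induction raw with
  | nil => intro d lo u; simp
  | cons p raw ih =>
      intro d lo u
      rw [List.foldl_cons]
      cases hf : teams.find? (fun t => PySem.Str.isIn t p) with
      | none =>
          have hstep : pvBStep teams (d, lo) p = (d, lo ++ [p]) := by unfold pvBStep; rw [hf]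
          rw [hstep, ih, List.filter_cons_of_neg (by rw [hf]; simp)]
      | some key =>
          have hstep : pvBStep teams (d, lo) p = (d.modify key [] (fun x => x ++ [p]), lo) := by
            unfold pvBStep; rw [hf]
          rw [hstep, ih, PySem.Dict.contains_modify]
          by_cases hu : u = key
          · subst hu
            rw [List.filter_cons_of_pos (by rw [hf]; simp)]
            simp
          · have : (u == key) = false := by simp [hu]
            rw [this, List.filter_cons_of_neg (by rw [hf]; simp; exact fun e => hu e.symm)]
            simp
  

lemma pv_F2 (raw : List String) (pre ts : List String) (t : String) (hnp : t ∉ pre) :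
    (raw.filter (fun p => pre.all (fun u => !PySem.Str.isIn u p))).filter (fun p => PySem.Str.isIn t p)
      = raw.filter (fun p => (pre ++ t :: ts).find? (fun u => PySem.Str.isIn u p) == some t) := by
  rw [List.filter_filter]
  apply List.filter_congr
  intro p _
  simp only [PySem.Str.isIn_eq]
  rw [List.find?_append]
  by_cases hex : ∃ u ∈ pre, PySem.Chars.isIn u.toList p.toList = true
  case neg =>
    have hpre : ∀ u ∈ pre, PySem.Chars.isIn u.toList p.toList = false :=
      fun u hu => eq_false_of_ne_true (fun h => hex ⟨u, hu, h⟩)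
    have hfp : pre.find? (fun u => PySem.Chars.isIn u.toList p.toList) = none :=
      List.find?_eq_none.mpr (fun u hu => by simp [hpre u hu])
    rw [hfp, Option.none_or, List.find?_cons]
    by_cases htp : PySem.Chars.isIn t.toList p.toList = true
    · have hall : ∀ x ∈ pre, (!PySem.Chars.isIn x.toList p.toList) = true :=
        fun x hx => by simp [hpre x hx]
      rw [htp, Bool.true_and]
      have : (pre.all fun u => !PySem.Chars.isIn u.toList p.toList) = true := by
        rw [List.all_eq_true]
        intro x hx
        rw [hpre x hx]
        rfl
      rw [this]
      simp
    · have htf : PySem.Chars.isIn t.toList p.toList = false := eq_false_of_ne_true htp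
      cases hts : ts.find? (fun u => PySem.Chars.isIn u.toList p.toList) with
      | none => simp [htf]
      | some u =>
          have hu' := List.find?_some hts
          have hu : PySem.Chars.isIn u.toList p.toList = true := by simpa using hu' 
          have hne : u ≠ t := by
            intro e; rw [e, htf] at hu; exact Bool.false_ne_true hu
          simp [htf, hne]
  case pos =>
    have hsome : (pre.find? (fun u => PySem.Chars.isIn u.toList p.toList)).isSome := by
      rw [List.find?_isSome]; exact hex
    obtain ⟨u0, hu0⟩ := Option.isSome_iff_exists.mp hsome
    have hu0m : u0 ∈ pre := List.mem_of_find?_eq_some hu0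
    have hu0t : u0 ≠ t := fun e => hnp (e ▸ hu0m)
    have hall : pre.all (fun u => !PySem.Chars.isIn u.toList p.toList) = false := by
      obtain ⟨u, hu, hut⟩ := hex
      simp only [List.all_eq_false]
      exact ⟨u, hu, by simp [hut]⟩
    rw [hu0, hall]
    simp [hu0t]

lemma pv_live_step (raw pre : List String) (t : String) :
    raw.filter (fun p => (pre ++ [t]).all (fun u => !PySem.Str.isIn u p))
      = (raw.filter (fun p => pre.all (fun u => !PySem.Str.isIn u p))).filter
          (fun p => !PySem.Str.isIn t p) := by
  rw [List.filter_filter]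
  apply List.filter_congr
  intro p _
  rw [List.all_append]
  simp [Bool.and_comm]

lemma pv_B_char (raw teams : List String) :
    ∀ (ts pre : List String), teams = pre ++ ts →
    (ts.foldl (pvEmitStep (raw.foldl (pvBStep teams) (PySem.Dict.empty, [])).1)
        (pre.foldl (pvEmitStep (raw.foldl (pvBStep teams) (PySem.Dict.empty, [])).1) PySem.Dict.empty)).items
      = (pre.foldl (pvEmitStep (raw.foldl (pvBStep teams) (PySem.Dict.empty, [])).1) PySem.Dict.empty).items
        ++ pvCanon ts (raw.filter (fun p => pre.all (fun u => !PySem.Str.isIn u p))) := by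
  intro ts
  induction ts with
  | nil => intro pre hpre; simp [pvCanon]
  | cons t ts ih =>
      intro pre hpre
      set G := (raw.foldl (pvBStep teams) (PySem.Dict.empty, [])).1 with hG
      set dpre := pre.foldl (pvEmitStep G) PySem.Dict.empty with hdpre
      set live := raw.filter (fun p => pre.all (fun u => !PySem.Str.isIn u p)) with hlive
      have hstep_fold : pvEmitStep G dpre t = (pre ++ [t]).foldl (pvEmitStep G) PySem.Dict.empty := by
        rw [List.foldl_append]
        rfl
      have hpre' : teams = (pre ++ [t]) ++ ts := by rw [hpre]; simp
      have hIH := ih (pre ++ [t]) hpre'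
      rw [pv_live_step raw pre t, ← hlive] at hIH
      rw [List.foldl_cons]
      by_cases hmem : t ∈ pre
      · have hM : live.filter (fun p => PySem.Str.isIn t p) = [] := by
          apply List.filter_eq_nil_iff.mpr
          intro a ha hpred
          have hpred' : PySem.Str.isIn t a = true := hpred
          have hall : pre.all (fun u => !PySem.Str.isIn u a) = true :=
            List.of_mem_filter (p := fun p => pre.all (fun u => !PySem.Str.isIn u p)) ha
          have hta : (!PySem.Str.isIn t a) = true := List.all_eq_true.mp hall t hmem
          rw [hpred'] at hta
          simp at hta
        have hlivekeep : live.filter (fun p => !PySem.Str.isIn t p) = live := pv_filter_not _ _ hM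
        have hcanon : pvCanon (t :: ts) live = pvCanon ts live := by
          simp only [pvCanon, hM]
          rfl
        have hnoop : pvEmitStep G dpre t = dpre := by
          unfold pvEmitStep
          by_cases hg : G.contains t = true
          · rw [if_pos hg]
            apply pv_insert_self _ _ _ (pv_emit_nodup G pre _ PySem.Dict.nodup_keys_empty)
            rw [pv_emit_get? G pre _ t, if_pos ⟨hmem, hg⟩]
          · rw [if_neg hg]
        rw [hnoop, hcanon]
        rw [hlivekeep, ← hstep_fold, hnoop] at hIH
        exact hIH
      · have hM2 := pv_F2 raw pre ts t hmem
        rw [← hpre, ← hlive] at hM2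
        have hgd : G.getD t [] = raw.filter (fun p => teams.find? (fun u => PySem.Str.isIn u p) == some t) := by
          rw [hG]
          have := pv_groups_getD teams raw PySem.Dict.empty [] t
          simpa using this
        have hgc : G.contains t
            = !(raw.filter (fun p => teams.find? (fun u => PySem.Str.isIn u p) == some t)).isEmpty := by
          rw [hG]
          have := pv_groups_contains teams raw PySem.Dict.empty [] t
          simpa using this
        rw [← hM2] at hgd hgc
        by_cases hM : live.filter (fun p => PySem.Str.isIn t p) = []
        · have hgcf : G.contains t = false := by rw [hgc, hM]; rfl
          have hlivekeep : live.filter (fun p => !PySem.Str.isIn t p) = live := pv_filter_not _ _ hM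
          have hcanon : pvCanon (t :: ts) live = pvCanon ts live := by
            simp only [pvCanon, hM]
            rfl
          have hnoop : pvEmitStep G dpre t = dpre := by
            unfold pvEmitStep
            rw [if_neg (by rw [hgcf]; exact Bool.false_ne_true)]
          rw [hnoop, hcanon]
          rw [hlivekeep, ← hstep_fold, hnoop] at hIH
          exact hIH
        · have hMne : (live.filter (fun p => PySem.Str.isIn t p)).isEmpty = false := by
            cases hh : (live.filter (fun p => PySem.Str.isIn t p)).isEmpty
            · rfl
            · exact absurd (List.isEmpty_iff.mp hh) hM
          have hgct : G.contains t = true := by rw [hgc, hMne]; rfl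
          have hdc : dpre.contains t = false := by
            have hq := pv_emit_get? G pre PySem.Dict.empty t
            rw [if_neg (fun hh => hmem hh.1)] at hq
            rw [hdpre]
            exact (PySem.Dict.get?_eq_none_iff_contains _ t).mp (by simpa using hq)
          have hstep : pvEmitStep G dpre t = dpre.insert t (live.filter (fun p => PySem.Str.isIn t p)) := by
            unfold pvEmitStep
            rw [if_pos hgct, hgd]
          have hcanon : pvCanon (t :: ts) live
              = (t, live.filter (fun p => PySem.Str.isIn t p)) ::
                pvCanon ts (live.filter (fun p => !PySem.Str.isIn t p)) := by
            simp only [pvCanon, hMne]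
            rfl
          rw [hstep_fold, hIH, ← hstep_fold, hstep,
            PySem.Dict.items_insert_of_not_contains _ _ hdc, hcanon]
          simp

-- ===== VERDICT (by name: the statement is the Claim_ definition above) =====
theorem groupFilePathsByTeamID_spec : Claim_equal_groupFilePathsByTeamID := by
  intro raw teams _
  unfold Spec_groupFilePathsByTeamID groupFilePathsByTeamID groupFilePathsByTeamID_alt
  have hA := pv_A_char teams PySem.Dict.empty raw PySem.Dict.nodup_keys_empty
    (by intro u hu; rw [PySem.Dict.contains_empty] at hu; exact absurd hu Bool.false_ne_true)
  have hB := pv_B_char raw teams teams [] rfl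
  have hfilter : raw.filter (fun p => ([] : List String).all (fun u => !PySem.Str.isIn u p)) = raw :=
    List.filter_eq_self.mpr (fun a _ => rfl)
  rw [List.foldl_nil, hfilter] at hB
  show (teams.foldl (fun st teamID => pvAInner teamID st.2 st) (PySem.Dict.empty, raw)).1.items
      = (teams.foldl (pvEmitStep (raw.foldl (pvBStep teams) (PySem.Dict.empty, [])).1) PySem.Dict.empty).items
  rw [hA, hB]
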